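-- pv_equiv track=rewrite | github.com/SEIR-221-Resources/daily_py_challenges | challenges.py | sum_of_minimums
-- ===== SOURCE A (Python) =====
-- def sum_of_minimums(list):
--     check = list[0]
--
--
--     pivot = list[-1]
--     left = [num for num in list[:-1] if num <= pivot]
--     right = [num for num in list[:-1] if num > pivot]
--     if left == []:
--         lowest_2 = pivot + right[0]
--
--         return lowest_2
--     elif len(left) == 1:
--         lowest_2 = left[0] + pivot
--
--         return lowest_2
--     else:
--         return sum_of_minimums(left)
-- ===== SOURCE B (Python) =====
-- def sum_of_minimums(list):
--     # Iterative index-based version: instead of rebuilding value lists and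
--     # recursing, walk positions in the original list.  `first`/`j` are the
--     # indices of the first and last element of the current working segment;
--     # `hits` are the positions before j holding values <= the pivot.
--     first = 0
--     j = len(list) - 1
--     p = list[j]
--     while True:
--         hits = [i for i in range(j) if list[i] <= p]
--         if not hits:
--             return p + list[first]
--         if len(hits) == 1:
--             return list[hits[0]] + p
--         first = hits[0]
--         j = hits[-1]
--         p = list[j]
-- ===== Notes on version B (the rewrite author's own statement) =====
-- stated objective: alternative
-- what changed: Replaces A's recursion that rebuilds left/right value lists at each level by an iterative loop over index positions in the original list, keeping only the first/last/pivot positions of the current working segment and one filtered index list per pass.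
import Mathlib
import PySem

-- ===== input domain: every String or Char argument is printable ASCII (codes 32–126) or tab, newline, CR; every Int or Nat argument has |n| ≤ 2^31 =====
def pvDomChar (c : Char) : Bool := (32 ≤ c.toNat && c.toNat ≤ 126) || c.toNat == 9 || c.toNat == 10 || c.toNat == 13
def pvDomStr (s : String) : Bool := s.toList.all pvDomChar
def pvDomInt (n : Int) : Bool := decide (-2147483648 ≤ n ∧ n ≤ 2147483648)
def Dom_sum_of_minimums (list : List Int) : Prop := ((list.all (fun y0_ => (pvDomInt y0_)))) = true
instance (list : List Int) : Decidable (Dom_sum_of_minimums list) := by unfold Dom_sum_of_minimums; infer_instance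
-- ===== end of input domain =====

-- B replaces A's recursion on freshly built left/right value lists by an iterative
-- walk over index positions of the original list (alternative decomposition, same cost).

-- ===== PORT A =====
-- Literal port of A.  Python raises IndexError on [] (list[0]) and on one-element
-- lists (right[0] with right = []); those inputs are outside Pre_ and the port
-- returns a default there.
def sum_of_minimums (list : List Int) : Int :=
  if h : list = [] then 0
  else
    let pivot := list.getLastD 0
    let left := list.dropLast.filter (fun num => decide (num ≤ pivot))
    let right := list.dropLast.filter (fun num => decide (pivot < num))
    if left = [] then
      pivot + right.headD 0
    else if left.length = 1 then
      left.headD 0 + pivot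
    else
      sum_of_minimums left
termination_by list.length
decreasing_by
  refine lt_of_le_of_lt (List.length_filter_le _ _) ?_
  rw [List.length_dropLast]
  have := List.length_pos_iff.mpr h
  omega

-- ===== PORT B =====
-- The while-True loop of Source B: state (first, j, p); `hits` is Source B's
-- index comprehension.  lst.getD i 0 ports lst[i] (all indices used are in range
-- on inputs admitted by Pre_).
def altLoop (lst : List Int) (first : Nat) (j : Nat) (p : Int) : Int :=
  let hits := (List.range j).filter (fun i => decide (lst.getD i 0 ≤ p))
  if h1 : hits = [] then p + lst.getD first 0
  else if hits.length = 1 then lst.getD (hits.headD 0) 0 + p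
  else altLoop lst (hits.headD 0) (hits.getLastD 0) (lst.getD (hits.getLastD 0) 0)
termination_by j
decreasing_by
  have hm : hits.getLastD 0 ∈ hits := by
    rw [List.getLastD_eq_getLast?, List.getLast?_eq_some_getLast h1]
    exact List.getLast_mem h1
  exact List.mem_range.1 (List.mem_filter.1 hm).1

def sum_of_minimums_alt (list : List Int) : Int :=
  altLoop list 0 (list.length - 1) (list.getD (list.length - 1) 0)

-- ===== PRECONDITION & SPEC =====
-- Pre_ excludes exactly the inputs where Python A raises IndexError: the empty
-- list (list[0]) and one-element lists (right[0] on the empty right).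
def Pre_sum_of_minimums (list : List Int) : Prop := 2 ≤ list.length
instance (list : List Int) : Decidable (Pre_sum_of_minimums list) := by
  unfold Pre_sum_of_minimums; infer_instance

def pvWitness_sum_of_minimums : List Int := [3, 1]

def Spec_sum_of_minimums (list : List Int) (out : Int) : Prop := out = sum_of_minimums_alt list
instance (list : List Int) (out : Int) : Decidable (Spec_sum_of_minimums list out) := by
  unfold Spec_sum_of_minimums; infer_instance

-- ===== CLAIM (what is proved, stated in full; the proofs are below) =====
def Claim_equal_sum_of_minimums : Prop := ∀ (list : List Int), Dom_sum_of_minimums list → Pre_sum_of_minimums list → Spec_sum_of_minimums list (sum_of_minimums list)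

-- ===== LEMMAS AND PROOFS =====

lemma pv_dropLast_map {α β : Type} (f : α → β) (l : List α) :
    (l.map f).dropLast = l.dropLast.map f := by
  simp [List.map_dropLast]

lemma pv_filter_map {α β : Type} (f : α → β) (q : β → Bool) (l : List α) :
    (l.map f).filter q = (l.filter (fun a => q (f a))).map f := by
  rw [List.filter_map]; rfl

lemma pv_sorted_ext (S T : List Nat) (hS : S.Pairwise (· < ·)) (hT : T.Pairwise (· < ·))
    (h : ∀ i, i ∈ S ↔ i ∈ T) : S = T :=
  List.Perm.eq_of_pairwise
    (fun a b _ _ h1 h2 => absurd h1 (Nat.not_lt.2 (Nat.le_of_lt h2)))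
    hS hT ((List.perm_ext_iff_of_nodup (hS.imp Nat.ne_of_lt) (hT.imp Nat.ne_of_lt)).2 h)

lemma pv_getLastD_map {α β : Type} (f : α → β) (l : List α) (hl : l ≠ []) (d : β) (d0 : α) :
    (l.map f).getLastD d = f (l.getLastD d0) := by
  rw [List.getLastD_eq_getLast?, List.getLastD_eq_getLast?, List.getLast?_map,
      List.getLast?_eq_some_getLast hl]
  rfl

lemma pv_headD_map {α β : Type} (f : α → β) (l : List α) (hl : l ≠ []) (d : β) (d0 : α) :
    (l.map f).headD d = f (l.headD d0) := by
  match l with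
  | a :: t => simp

lemma pv_headD_dropLast (S : List Nat) (h : 2 ≤ S.length) (d : Nat) :
    S.dropLast.headD d = S.headD d := by
  match S with
  | a :: b :: t => simp

lemma pv_dropLast_append_getLastD (S : List Nat) (h : S ≠ []) :
    S.dropLast ++ [S.getLastD 0] = S := by
  rw [List.getLastD_eq_getLast?, List.getLast?_eq_some_getLast h]
  exact List.dropLast_append_getLast h

lemma pv_getLastD_mem (S : List Nat) (h : S ≠ []) : S.getLastD 0 ∈ S := by
  rw [List.getLastD_eq_getLast?, List.getLast?_eq_some_getLast h]
  exact List.getLast_mem h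

-- Main invariant: if S is the sorted index set of A's current working list,
-- its last index is j, and S is downward closed below j for values ≤ lst[j],
-- then A on the value list equals B's loop at state (S.head, j, lst[j]).
lemma main_invariant (lst : List Int) (j : Nat) : ∀ (S : List Nat),
    S.getLastD 0 = j → S.Pairwise (· < ·) → 2 ≤ S.length →
    (∀ i, i < j → lst.getD i 0 ≤ lst.getD j 0 → i ∈ S) →
    sum_of_minimums (S.map (fun i => lst.getD i 0)) =
      altLoop lst (S.headD 0) j (lst.getD j 0) := by
  induction j using Nat.strong_induction_on with
  | _ j IH =>
    intro S hlast hsort hlen hCL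
    have hSne : S ≠ [] := by intro h; subst h; simp at hlen
    set f : Nat → Int := fun i => lst.getD i 0 with hf
    set p : Int := lst.getD j 0 with hp
    set T : List Nat := (List.range j).filter (fun i => decide (lst.getD i 0 ≤ p)) with hT
    have hsplit : S.dropLast ++ [j] = S := by
      rw [← hlast]; exact pv_dropLast_append_getLastD S hSne
    have hdlt : ∀ i ∈ S.dropLast, i < j := by
      intro i hi
      have := (List.pairwise_append.1 (show (S.dropLast ++ [j]).Pairwise (· < ·) by rw [hsplit]; exact hsort)).2.2
      exact this i hi j (by simp)
    have hdsort : S.dropLast.Pairwise (· < ·) :=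
      List.Pairwise.sublist (List.dropLast_sublist S) hsort
    have hTsort : T.Pairwise (· < ·) := List.Pairwise.filter _ (List.pairwise_lt_range)
    -- the key set identity: A's filtered index set below j equals B's hits
    have KEY : S.dropLast.filter (fun i => decide (lst.getD i 0 ≤ p)) = T := by
      apply pv_sorted_ext _ _ (List.Pairwise.filter _ hdsort) hTsort
      intro i
      constructor
      · intro hi
        have h1 := List.mem_filter.1 hi
        exact List.mem_filter.2 ⟨List.mem_range.2 (hdlt i h1.1), h1.2⟩
      · intro hi
        have h1 := List.mem_filter.1 hi
        have hij := List.mem_range.1 h1.1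
        have hv : lst.getD i 0 ≤ p := by simpa using h1.2
        have hiS : i ∈ S := hCL i hij hv
        have h2 : i ∈ S.dropLast ++ [j] := by rw [hsplit]; exact hiS
        rcases List.mem_append.1 h2 with h | h
        · exact List.mem_filter.2 ⟨h, h1.2⟩
        · simp at h; omega
    have hmapne : ¬ (S.map f) = [] := by simp [hSne]
    have hpivot : (S.map f).getLastD 0 = p := by
      rw [pv_getLastD_map f S hSne 0 0, hlast]
    have hleft : (S.map f).dropLast.filter (fun num => decide (num ≤ p)) = T.map f := by
      rw [pv_dropLast_map, pv_filter_map, KEY]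
    rw [sum_of_minimums]
    rw [dif_neg hmapne]
    simp only [hpivot, hleft]
    rw [altLoop]
    simp only [← hT]
    by_cases hT0 : T = []
    · -- left empty on both sides
      have hTm0 : (T.map f) = [] := by simp [hT0]
      rw [if_pos hTm0, dif_pos hT0]
      -- right = all of dropLast, since nothing is ≤ p
      have hdne : S.dropLast ≠ [] := by
        intro h
        have := congrArg List.length hsplit
        simp [h] at this
        omega
      have hnone : ∀ x ∈ (S.map f).dropLast, ¬ (x ≤ p) := by
        rw [pv_dropLast_map]
        intro x hx
        rcases List.mem_map.1 hx with ⟨i, hi, rfl⟩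
        intro hle
        have : i ∈ T := by
          rw [← KEY]
          exact List.mem_filter.2 ⟨hi, by simpa using hle⟩
        simp [hT0] at this
      have hright : (S.map f).dropLast.filter (fun num => decide (p < num)) = (S.map f).dropLast := by
        apply List.filter_eq_self.2
        intro x hx
        simpa using lt_of_not_ge (fun h => hnone x hx h)
      rw [hright, pv_dropLast_map]
      rw [pv_headD_map f S.dropLast hdne 0 0, pv_headD_dropLast S hlen 0]
    · -- left nonempty
      have hTm0 : ¬ (T.map f) = [] := by simp [hT0]
      rw [if_neg hTm0, dif_neg hT0]
      by_cases hT1 : T.length = 1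
      · have hTm1 : (T.map f).length = 1 := by simp [hT1]
        rw [if_pos hTm1, if_pos hT1]
        rw [pv_headD_map f T hT0 0 0]
      · have hTm1 : ¬ (T.map f).length = 1 := by simp [hT1]
        rw [if_neg hTm1, if_neg hT1]
        -- recursive step
        have hj' : T.getLastD 0 ∈ T := pv_getLastD_mem T hT0
        have hj'lt : T.getLastD 0 < j := by
          have := (List.mem_filter.1 hj').1
          exact List.mem_range.1 this
        have hj'le : f (T.getLastD 0) ≤ p := by
          have := (List.mem_filter.1 hj').2
          simpa using this
        refine IH (T.getLastD 0) hj'lt T rfl hTsort ?_ ?_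
        · have := List.length_pos_of_ne_nil hT0
          omega
        · intro i hij' hile
          have : i ∈ List.range j := List.mem_range.2 (Nat.lt_trans hij' hj'lt)
          refine List.mem_filter.2 ⟨this, ?_⟩
          simp only [decide_eq_true_eq]
          exact le_trans hile hj'le

lemma pv_map_getD_range (l : List Int) :
    (List.range l.length).map (fun i => l.getD i 0) = l := by
  apply List.ext_getElem
  · simp
  · intro i h1 h2
    simp [List.getD_eq_getElem?_getD, List.getElem?_eq_getElem h2]

-- ===== VERDICT (by name: the statement is the Claim_ definition above) =====
theorem sum_of_minimums_spec : Claim_equal_sum_of_minimums := by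
  intro list hdom hpre
  unfold Spec_sum_of_minimums
  unfold Pre_sum_of_minimums at hpre
  obtain ⟨m, hm⟩ : ∃ m, list.length = m + 1 := ⟨list.length - 1, by omega⟩
  have hmain := main_invariant list (list.length - 1) (List.range list.length)
    (by rw [hm]; simp [List.range_succ]) (List.pairwise_lt_range) (by simpa using hpre)
    (by intro i hij _; exact List.mem_range.2 (by omega))
  rw [pv_map_getD_range] at hmain
  have hhead : (List.range list.length).headD 0 = 0 := by
    rw [hm, List.range_succ_eq_map]; simp
  rw [hhead] at hmain
  exact hmain
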